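-- pv_equiv track=rewrite | github.com/ConanYu/MyCrawl | code/download.py | find_file_name
-- ===== SOURCE A (Python) =====
-- def find_file_name(url):
--     def clear_dir(obj):
--         st = set(r'?*/\<>:"|')
--         ret = ''
--         for i in obj:
--             if i not in st:
--                 ret += i
--         return ret
--
--     pos = 0
--     for i, j in enumerate(url):
--         if j == '/':
--             pos = i
--     return clear_dir(url[pos:])
-- ===== SOURCE B (Python) =====
-- def find_file_name(url):
--     illegal = set('?*\\<>:"|')
--     name = ''
--     for ch in url:
--         if ch == '/':
--             name = ''
--         elif ch not in illegal:
--             name += ch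
--     return name
-- ===== Notes on version B (the rewrite author's own statement) =====
-- stated objective: simpler
-- what changed: Replaced A's two passes (enumerate to find the last slash, then a separate filter over the tail slice) by one streaming pass that resets the accumulator on each '/' and otherwise appends legal characters.
import Mathlib
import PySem

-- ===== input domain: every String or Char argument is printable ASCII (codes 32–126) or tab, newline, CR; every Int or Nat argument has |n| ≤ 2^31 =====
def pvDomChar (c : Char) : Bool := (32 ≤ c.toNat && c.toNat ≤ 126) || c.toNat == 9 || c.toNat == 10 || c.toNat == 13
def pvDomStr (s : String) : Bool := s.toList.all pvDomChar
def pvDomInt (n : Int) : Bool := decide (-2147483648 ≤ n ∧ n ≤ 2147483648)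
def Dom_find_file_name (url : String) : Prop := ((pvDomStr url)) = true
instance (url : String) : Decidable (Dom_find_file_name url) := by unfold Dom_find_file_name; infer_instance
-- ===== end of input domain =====

-- B replaces A's two passes (find last slash, then filter the tail) by one streaming pass that resets on '/'; objective: simpler.

-- ===== PORT A =====
-- the inner helper clear_dir: filter out the illegal characters, building the result by appends
def pvClearDir (obj : List Char) : List Char :=
  let st : PySem.Set Char := PySem.Set.ofList ['?', '*', '/', '\\', '<', '>', ':', '"', '|']
  obj.foldl (fun ret i => if PySem.Set.contains st i then ret else ret ++ [i]) []

def find_file_name (url : String) : String :=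
  let l := url.toList
  let pos : Int :=
    (PySem.List.enumerate l).foldl (fun pos ij => if ij.2 = '/' then ij.1 else pos) 0
  String.ofList (pvClearDir (PySem.List.slice l (some pos) none))

-- ===== PORT B =====
def find_file_name_alt (url : String) : String :=
  String.ofList (url.toList.foldl
    (fun name ch =>
      if ch = '/' then []
      else if ch ∈ (['?', '*', '\\', '<', '>', ':', '"', '|'] : List Char) then name
      else name ++ [ch])
    [])

-- ===== PRECONDITION & SPEC =====
def Spec_find_file_name (url : String) (out : String) : Prop := out = find_file_name_alt url
instance (url : String) (out : String) : Decidable (Spec_find_file_name url out) := by unfold Spec_find_file_name; infer_instance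

-- ===== CLAIM (what is proved, stated in full; the proofs are below) =====
def Claim_equal_find_file_name : Prop := ∀ (url : String), Dom_find_file_name url → Spec_find_file_name url (find_file_name url)

-- ===== LEMMAS AND PROOFS =====

-- A's last-slash position loop, as a function of the char list
def pvPos (l : List Char) : Int :=
  (PySem.List.enumerate l).foldl (fun pos ij => if ij.2 = '/' then ij.1 else pos) 0

-- B's loop body
def pvStep (name : List Char) (ch : Char) : List Char :=
  if ch = '/' then []
  else if ch ∈ (['?', '*', '\\', '<', '>', ':', '"', '|'] : List Char) then name
  else name ++ [ch]

-- A's keep-this-character test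
def pvP (i : Char) : Bool :=
  !PySem.Set.contains (PySem.Set.ofList ['?', '*', '/', '\\', '<', '>', ':', '"', '|']) i

theorem pvPos_append (l : List Char) (c : Char) :
    pvPos (l ++ [c]) = if c = '/' then (l.length : Int) else pvPos l := by
  simp [pvPos, PySem.List.enumerate_append, List.foldl_append, PySem.List.enumerate_cons]

theorem pvPos_bounds (l : List Char) : 0 ≤ pvPos l ∧ pvPos l ≤ l.length := by
  induction l using List.reverseRecOn with
  | nil => simp [pvPos, PySem.List.enumerate_nil]
  | append_singleton l c ih =>
      rw [pvPos_append]
      split_ifs <;> simp <;> omega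

-- A's filter loop is List.filter with the keep test
theorem pvClearDir_eq_filter (obj : List Char) :
    pvClearDir obj = obj.filter pvP := by
  unfold pvClearDir
  have h := PySem.List.foldl_append_if_eq_filter (p := pvP) (l := obj) (acc := ([] : List Char))
  simp only [List.nil_append] at h
  rw [← h]
  apply PySem.List.foldl_congr_mem
  intro acc x _
  simp only [pvP]
  by_cases hc : PySem.Set.contains (PySem.Set.ofList ['?', '*', '/', '\\', '<', '>', ':', '"', '|']) x <;> simp [hc] <;> split_ifs <;> tauto

-- main invariant: B's single pass computes A's filtered tail after the last slash
theorem pv_main (l : List Char) :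
    (l.drop (pvPos l).toNat).filter pvP = l.foldl pvStep [] := by
  induction l using List.reverseRecOn with
  | nil => simp [pvPos, PySem.List.enumerate_nil]
  | append_singleton l c ih =>
      rw [List.foldl_append, pvPos_append]
      by_cases hc : c = '/'
      · subst hc
        simp [pvStep, pvP, PySem.Set.contains]
      · rw [if_neg hc]
        have hb := pvPos_bounds l
        have hle : (pvPos l).toNat ≤ l.length := by omega
        rw [List.drop_append_of_le_length hle, List.filter_append, ih]
        by_cases hm : c ∈ (['?', '*', '\\', '<', '>', ':', '"', '|'] : List Char)
        · have h1 : pvP c = false := by fin_cases hm <;> decide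
          simp [pvStep, hc, hm, List.filter, h1]
        · have h2 : pvP c = true := by
            simp only [pvP, Bool.not_eq_true']
            simp only [List.mem_cons, List.not_mem_nil, or_false] at hm
            simp [PySem.Set.contains, PySem.Set.ofList]
            tauto
          simp [pvStep, hc, hm, List.filter, h2]

-- ===== VERDICT (by name: the statement is the Claim_ definition above) =====
theorem find_file_name_spec : Claim_equal_find_file_name := by
  intro url _
  show String.ofList (pvClearDir (PySem.List.slice url.toList (some (pvPos url.toList)) none))
      = String.ofList (url.toList.foldl pvStep [])
  have hb := pvPos_bounds url.toList
  rw [PySem.List.slice_from _ hb.1, pvClearDir_eq_filter, pv_main]
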